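-- pv_equiv track=rewrite | github.com/ricktech01/stoichiometry-calculator | sigFigs.py | getDeciZ
-- ===== SOURCE A (Python) =====
-- def getDeci(sVal):
--     temp = ''
--     reached = False
--     for i in sVal:
--         if reached:
--             temp += i
--         if i == '.':
--             reached = True
--     return temp
--
-- def getDeciZ(sVal):
--     temp = getDeci(sVal)
--     out = ''
--     reached = False
--     for i in temp:
--         if i != '0':
--             reached = True
--         if not reached:
--             out += i
--     return out
-- ===== SOURCE B (Python) =====
-- def getDeciZ(sVal):
--     out = ''
--     after_dot = False
--     for c in sVal:
--         if after_dot: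
--             if c == '0':
--                 out += c
--             else:
--                 break
--         elif c == '.':
--             after_dot = True
--     return out
-- ===== Notes on version B (the rewrite author's own statement) =====
-- stated objective: simpler
-- what changed: Replaced the two-pass helper pipeline (build the full decimal substring, then rescan it for leading zeros) with a single pass over sVal that breaks at the first non-zero after the dot, eliminating the helper and the intermediate string.
import Mathlib
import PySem

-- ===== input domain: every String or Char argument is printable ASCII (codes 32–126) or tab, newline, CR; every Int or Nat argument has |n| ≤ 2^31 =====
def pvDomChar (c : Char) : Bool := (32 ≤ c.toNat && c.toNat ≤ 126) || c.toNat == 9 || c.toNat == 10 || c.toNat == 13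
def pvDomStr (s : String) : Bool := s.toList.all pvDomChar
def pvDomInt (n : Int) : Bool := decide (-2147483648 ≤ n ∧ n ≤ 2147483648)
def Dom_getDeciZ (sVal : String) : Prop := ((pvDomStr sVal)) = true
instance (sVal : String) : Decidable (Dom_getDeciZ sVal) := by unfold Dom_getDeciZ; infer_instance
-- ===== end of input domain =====

-- B fuses A's two passes (build decimal substring, then scan its leading zeros) into one
-- pass with a break, removing the helper and the intermediate string (objective: simpler).


-- ===== PORT A =====
-- strings are traversed as List Char; '+=' on a string is list append
def getDeci (sVal : String) : String :=
  let r := sVal.toList.foldl (fun (st : List Char × Bool) i =>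
    let temp := if st.2 then st.1 ++ [i] else st.1
    let reached := if i = '.' then true else st.2
    (temp, reached)) ([], false)
  String.mk r.1

def getDeciZ (sVal : String) : String :=
  let temp := getDeci sVal
  let r := temp.toList.foldl (fun (st : List Char × Bool) i =>
    let reached := if i ≠ '0' then true else st.2
    let out := if !reached then st.1 ++ [i] else st.1
    (out, reached)) ([], false)
  String.mk r.1

-- ===== PORT B =====
-- the for-loop with the mutable flag and 'break' becomes structural recursion on the chars
def getDeciZgo (afterDot : Bool) : List Char → List Char
  | [] => []
  | c :: cs =>
    if afterDot then
      (if c = '0' then c :: getDeciZgo afterDot cs else [])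
    else if c = '.' then getDeciZgo true cs
    else getDeciZgo afterDot cs

def getDeciZ_alt (sVal : String) : String :=
  String.mk (getDeciZgo false sVal.toList)

-- ===== PRECONDITION & SPEC =====
def Spec_getDeciZ (sVal : String) (out : String) : Prop := out = getDeciZ_alt sVal
instance (sVal : String) (out : String) : Decidable (Spec_getDeciZ sVal out) := by unfold Spec_getDeciZ; infer_instance

-- ===== CLAIM (what is proved, stated in full; the proofs are below) =====
def Claim_equal_getDeciZ : Prop := ∀ (sVal : String), Dom_getDeciZ sVal → Spec_getDeciZ sVal (getDeciZ sVal)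

-- ===== LEMMAS AND PROOFS =====

-- named forms of the ports' fold bodies (definitionally equal to the inline lambdas)
def stepA (st : List Char × Bool) (i : Char) : List Char × Bool :=
  (if st.2 then st.1 ++ [i] else st.1, if i = '.' then true else st.2)

def stepZ (st : List Char × Bool) (i : Char) : List Char × Bool :=
  ((if !(if i ≠ '0' then true else st.2) then st.1 ++ [i] else st.1),
   (if i ≠ '0' then true else st.2))

-- the decimal part: chars strictly after the first '.'
def decPart : List Char → List Char
  | [] => []
  | c :: cs => if c = '.' then cs else decPart cs

theorem foldA_true (l temp : List Char) :
    l.foldl stepA (temp, true) = (temp ++ l, true) := by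
  induction l generalizing temp with
  | nil => simp
  | cons c cs ih =>
    rw [List.foldl_cons]
    have hs : stepA (temp, true) c = (temp ++ [c], true) := by
      simp [stepA]
    rw [hs, ih]
    simp

theorem foldA_false (l temp : List Char) :
    (l.foldl stepA (temp, false)).1 = temp ++ decPart l := by
  induction l generalizing temp with
  | nil => simp [decPart]
  | cons c cs ih =>
    rw [List.foldl_cons]
    by_cases h : c = '.'
    · have hs : stepA (temp, false) c = (temp, true) := by simp [stepA, h]
      rw [hs, foldA_true, decPart, if_pos h]
    · have hs : stepA (temp, false) c = (temp, false) := by simp [stepA, h]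
      rw [hs, ih, decPart, if_neg h]

theorem getDeci_eq (sVal : String) :
    getDeci sVal = String.mk (decPart sVal.toList) := by
  show String.mk (sVal.toList.foldl stepA ([], false)).1 = _
  rw [foldA_false]
  simp

theorem foldZ_true (l out : List Char) :
    l.foldl stepZ (out, true) = (out, true) := by
  induction l with
  | nil => rfl
  | cons c cs ih =>
    rw [List.foldl_cons]
    have hs : stepZ (out, true) c = (out, true) := by
      simp [stepZ]
    rw [hs, ih]

theorem foldZ_false (l out : List Char) :
    (l.foldl stepZ (out, false)).1 = out ++ l.takeWhile (· = '0') := by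
  induction l generalizing out with
  | nil => simp
  | cons c cs ih =>
    rw [List.foldl_cons]
    by_cases h : c = '0'
    · have hs : stepZ (out, false) c = (out ++ [c], false) := by
        simp [stepZ, h]
      rw [hs, ih]
      simp [List.takeWhile, h]
    · have hs : stepZ (out, false) c = (out, true) := by
        simp [stepZ, h]
      rw [hs, foldZ_true]
      simp [List.takeWhile, h]

theorem goB_true (l : List Char) :
    getDeciZgo true l = l.takeWhile (· = '0') := by
  induction l with
  | nil => rfl
  | cons c cs ih =>
    by_cases h : c = '0' <;> simp [getDeciZgo, h, ih, List.takeWhile]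

theorem goB_false (l : List Char) :
    getDeciZgo false l = (decPart l).takeWhile (· = '0') := by
  induction l with
  | nil => rfl
  | cons c cs ih =>
    by_cases h : c = '.'
    · simp [getDeciZgo, h, goB_true, decPart]
    · simp [getDeciZgo, h, ih, decPart]

-- ===== VERDICT (by name: the statement is the Claim_ definition above) =====
theorem getDeciZ_spec : Claim_equal_getDeciZ := by
  intro sVal _
  show String.mk ((getDeci sVal).toList.foldl stepZ ([], false)).1 = getDeciZ_alt sVal
  rw [getDeci_eq, foldZ_false, getDeciZ_alt, goB_false]
  have h : ∀ l : List Char, (String.mk l).toList = l := fun _ => String.toList_ofList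
  rw [h]
  simp
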